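-- pv_equiv track=rewrite | github.com/ThenTech/BDA-Assignments | Plagiarism/Resources/submissions/submissions/3587201.py | cleanup_spaces
-- ===== SOURCE A (Python) =====
-- def cleanup_spaces(s):
--     letterPassed = False
--     tempString = ""
--
--     for i in s:
--         if i != " ":
--             letterPassed = True
--             tempString += i
--
--         elif i == " " and letterPassed:
--             tempString += i
--             letterPassed = False
--
--
--
--     return tempString
-- ===== SOURCE B (Python) =====
-- import re
--
-- def cleanup_spaces(s):
--     return re.sub(r' +', ' ', s).lstrip(' ')
-- ===== Notes on version B (the rewrite author's own statement) =====
-- stated objective: idiomatic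
-- what changed: Replaced the stateful per-character scan (letterPassed flag plus manual string concatenation) with a single regex substitution that collapses each run of spaces to one, followed by lstrip of leading spaces.
import Mathlib
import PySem

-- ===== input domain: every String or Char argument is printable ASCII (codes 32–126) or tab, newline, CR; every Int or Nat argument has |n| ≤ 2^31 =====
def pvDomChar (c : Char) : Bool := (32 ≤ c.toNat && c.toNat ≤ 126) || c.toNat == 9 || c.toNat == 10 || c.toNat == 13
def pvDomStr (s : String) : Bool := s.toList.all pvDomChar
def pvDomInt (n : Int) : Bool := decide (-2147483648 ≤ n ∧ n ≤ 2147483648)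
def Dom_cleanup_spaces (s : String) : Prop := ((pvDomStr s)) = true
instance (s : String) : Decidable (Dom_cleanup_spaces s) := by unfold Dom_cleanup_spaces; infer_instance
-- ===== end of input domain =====

-- B replaces A's stateful flag-and-append scan by a regex space-run collapse plus lstrip(' '); objective: idiomatic.

-- ===== PORT A =====
-- literal port of A's loop: state (letterPassed, tempString); tempString += i as list append
def pvStepA (st : Bool × List Char) (i : Char) : Bool × List Char :=
  if i ≠ ' ' then (true, st.2 ++ [i])
  else if i = ' ' ∧ st.1 then (false, st.2 ++ [i])
  else st

def cleanup_spaces (s : String) : String :=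
  String.mk (s.toList.foldl pvStepA (false, [])).2

-- ===== PORT B =====
-- hand port of re.sub(r' +', ' ', s): collapse each maximal run of spaces to a single space (exact on any string)
def pvCollapse : List Char → List Char
  | [] => []
  | ' ' :: ' ' :: rest => pvCollapse (' ' :: rest)
  | c :: rest => c :: pvCollapse rest

-- .lstrip(' ') = dropWhile (· == ' ')
def cleanup_spaces_alt (s : String) : String :=
  String.mk ((pvCollapse s.toList).dropWhile (· == ' '))

-- ===== PRECONDITION & SPEC =====
def Spec_cleanup_spaces (s : String) (out : String) : Prop := out = cleanup_spaces_alt s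
instance (s : String) (out : String) : Decidable (Spec_cleanup_spaces s out) := by unfold Spec_cleanup_spaces; infer_instance

-- ===== CLAIM (what is proved, stated in full; the proofs are below) =====
def Claim_equal_cleanup_spaces : Prop := ∀ (s : String), Dom_cleanup_spaces s → Spec_cleanup_spaces s (cleanup_spaces s)

-- ===== LEMMAS AND PROOFS =====

-- recursive restatement of A's loop (result characters only, parametrised by the flag)
def loopA : Bool → List Char → List Char
  | _, [] => []
  | lp, c :: cs =>
    if c ≠ ' ' then c :: loopA true cs
    else if lp then c :: loopA false cs
    else loopA lp cs

theorem foldl_eq_loopA (cs : List Char) (lp : Bool) (acc : List Char) :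
    (cs.foldl pvStepA (lp, acc)).2 = acc ++ loopA lp cs := by
  induction cs generalizing lp acc with
  | nil => simp [loopA]
  | cons c cs ih =>
    by_cases hc : c = ' '
    · subst hc
      cases lp <;> simp [loopA, pvStepA, ih, List.append_assoc]
    · simp [loopA, pvStepA, hc, ih, List.append_assoc]

theorem loopA_true_eq_collapse (cs : List Char) :
    loopA true cs = pvCollapse cs := by
  induction cs using pvCollapse.induct with
  | case1 => simp [loopA, pvCollapse]
  | case2 rest ih =>
    simpa [loopA, pvCollapse] using ih
  | case3 c rest h ih =>
    by_cases hc : c = ' '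
    · subst hc
      match rest with
      | [] => simp [loopA, pvCollapse]
      | d :: rest' =>
        have hd : d ≠ ' ' := fun hd => h rest' rfl (by rw [hd])
        simp [loopA, pvCollapse, hd] at ih ⊢
        simpa [loopA, hd] using ih
    · simpa [loopA, pvCollapse, hc] using ih

theorem loopA_false_eq (cs : List Char) :
    loopA false cs = (pvCollapse cs).dropWhile (· == ' ') := by
  induction cs using pvCollapse.induct with
  | case1 => simp [loopA, pvCollapse]
  | case2 rest ih =>
    simpa [loopA, pvCollapse] using ih
  | case3 c rest h ih =>
    by_cases hc : c = ' '
    · subst hc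
      match rest with
      | [] => simp [loopA, pvCollapse]
      | d :: rest' =>
        have hd : d ≠ ' ' := fun hd => h rest' rfl (by rw [hd])
        simp [loopA, pvCollapse, hd, List.dropWhile,
              show (d == ' ') = false by simp [hd]]
        exact loopA_true_eq_collapse rest'
    · simp [loopA, pvCollapse, hc, List.dropWhile,
            show (c == ' ') = false by simp [hc]]
      exact loopA_true_eq_collapse rest

-- ===== VERDICT (by name: the statement is the Claim_ definition above) =====
theorem cleanup_spaces_spec : Claim_equal_cleanup_spaces := by
  intro s _
  unfold Spec_cleanup_spaces cleanup_spaces cleanup_spaces_alt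
  rw [foldl_eq_loopA, loopA_false_eq]
  rfl
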